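-- pv_equiv track=rewrite | github.com/jjerry-k/programmers | 연습문제/모의고사.py | solution
-- ===== SOURCE A (Python) =====
-- def solution(answers):
--     answer = [0, 0, 0]
--     first_student = [1, 2, 3, 4 ,5]
--     second_student = [2, 1, 2, 3, 2, 4, 2, 5]
--     third_student = [3, 3, 1, 1, 2, 2, 4, 4, 5, 5]
--
--     for idx, a in enumerate(answers):
--         if a==first_student[idx%len(first_student)]:
--             answer[0] += 1
--         if a==second_student[idx%len(second_student)]:
--             answer[1] += 1
--         if a==third_student[idx%len(third_student)]:
--             answer[2] += 1
--
--     return [i + 1 for i, v in enumerate(answer) if v == max(answer)]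
-- ===== SOURCE B (Python) =====
-- def solution(answers):
--     patterns = [[1, 2, 3, 4, 5],
--                 [2, 1, 2, 3, 2, 4, 2, 5],
--                 [3, 3, 1, 1, 2, 2, 4, 4, 5, 5]]
--     # Bucket the answers once by (index mod 40, value) -- 40 = lcm(5, 8, 10),
--     # so each pattern's value at a residue class is fixed.  A score is then
--     # just 40 dictionary lookups; no per-answer pattern comparison happens.
--     cnt = {}
--     for i, a in enumerate(answers):
--         k = (i % 40, a)
--         cnt[k] = cnt.get(k, 0) + 1
--     scores = [sum(cnt.get((r, p[r % len(p)]), 0) for r in range(40)) for p in patterns]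
--     return [i + 1 for i, v in enumerate(scores) if v == max(scores)]
-- ===== Notes on version B (the rewrite author's own statement) =====
-- stated objective: alternative
-- what changed: Instead of comparing every answer against each of the three cyclic patterns, B buckets the answers once into a dictionary keyed by (index mod 40, value) (40 = lcm of the pattern lengths) and computes each student's score as a sum of 40 dictionary lookups; the tie/max selection line is unchanged.
import Mathlib
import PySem

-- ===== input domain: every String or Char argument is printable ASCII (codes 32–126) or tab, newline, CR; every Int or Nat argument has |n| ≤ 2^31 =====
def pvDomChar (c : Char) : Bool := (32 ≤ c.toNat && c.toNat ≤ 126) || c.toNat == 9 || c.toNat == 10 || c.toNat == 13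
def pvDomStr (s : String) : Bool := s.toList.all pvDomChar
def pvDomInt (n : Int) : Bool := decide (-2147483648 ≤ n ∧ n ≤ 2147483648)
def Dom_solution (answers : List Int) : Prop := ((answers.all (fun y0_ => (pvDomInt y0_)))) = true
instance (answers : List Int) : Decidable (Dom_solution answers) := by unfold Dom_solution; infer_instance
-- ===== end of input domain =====

-- B buckets the answers once into a dict keyed by (index mod 40, value) and reads each
-- of the three scores off as 40 dictionary lookups, instead of A's per-answer pattern
-- comparisons in one interleaved loop (alternative algorithm, same asymptotic cost).


-- ===== PORT A =====
-- literal port of A: one loop over enumerate(answers) incrementing the 3-slot tally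
def solution (answers : List Int) : List Int :=
  let first : List Int := [1, 2, 3, 4, 5]
  let second : List Int := [2, 1, 2, 3, 2, 4, 2, 5]
  let third : List Int := [3, 3, 1, 1, 2, 2, 4, 4, 5, 5]
  let t := (PySem.List.enumerate answers).foldl
    (fun (s : Int × Int × Int) (ia : Int × Int) =>
      let s := if ia.2 = PySem.List.pyGetD first (PySem.Int.mod ia.1 (first.length : Int)) 0
               then (s.1 + 1, s.2.1, s.2.2) else s
      let s := if ia.2 = PySem.List.pyGetD second (PySem.Int.mod ia.1 (second.length : Int)) 0
               then (s.1, s.2.1 + 1, s.2.2) else s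
      if ia.2 = PySem.List.pyGetD third (PySem.Int.mod ia.1 (third.length : Int)) 0
      then (s.1, s.2.1, s.2.2 + 1) else s)
    (0, 0, 0)
  let answer : List Int := [t.1, t.2.1, t.2.2]
  let m := ((PySem.List.max? answer (fun x => x)).getD 0)
  (PySem.List.enumerate answer).foldl
    (fun acc iv => if iv.2 = m then acc ++ [iv.1 + 1] else acc) []

-- ===== PORT B =====
-- port of B: a counting dict keyed by (i % 40, a), then each score = 40 lookups
def solution_alt (answers : List Int) : List Int :=
  let patterns : List (List Int) :=
    [[1, 2, 3, 4, 5], [2, 1, 2, 3, 2, 4, 2, 5], [3, 3, 1, 1, 2, 2, 4, 4, 5, 5]]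
  let cnt := (PySem.List.enumerate answers).foldl
    (fun (d : PySem.Dict (Int × Int) Int) ia =>
      let k := (PySem.Int.mod ia.1 40, ia.2)
      d.insert k (d.getD k 0 + 1))
    PySem.Dict.empty
  let scores : List Int := patterns.map (fun p =>
    (PySem.List.pyRange 0 40 1).foldl
      (fun acc r =>
        acc + cnt.getD (r, PySem.List.pyGetD p (PySem.Int.mod r (p.length : Int)) 0) 0)
      0)
  let m := ((PySem.List.max? scores (fun x => x)).getD 0)
  (PySem.List.enumerate scores).foldl
    (fun acc iv => if iv.2 = m then acc ++ [iv.1 + 1] else acc) []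

-- ===== PRECONDITION & SPEC =====
def Spec_solution (answers : List Int) (out : List Int) : Prop := out = solution_alt answers
instance (answers : List Int) (out : List Int) : Decidable (Spec_solution answers out) := by unfold Spec_solution; infer_instance

-- ===== CLAIM (what is proved, stated in full; the proofs are below) =====
def Claim_equal_solution : Prop := ∀ (answers : List Int), Dom_solution answers → Spec_solution answers (solution answers)

-- ===== LEMMAS AND PROOFS =====

-- A's interleaved fold computes the triple of three independent match-count folds.
theorem pv_tri (l : List (Int × Int)) (p1 p2 p3 : List Int) (s0 s1 s2 : Int) :
    l.foldl
      (fun (s : Int × Int × Int) (ia : Int × Int) =>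
        let s := if ia.2 = PySem.List.pyGetD p1 (PySem.Int.mod ia.1 (p1.length : Int)) 0
                 then (s.1 + 1, s.2.1, s.2.2) else s
        let s := if ia.2 = PySem.List.pyGetD p2 (PySem.Int.mod ia.1 (p2.length : Int)) 0
                 then (s.1, s.2.1 + 1, s.2.2) else s
        if ia.2 = PySem.List.pyGetD p3 (PySem.Int.mod ia.1 (p3.length : Int)) 0
        then (s.1, s.2.1, s.2.2 + 1) else s)
      (s0, s1, s2)
    = (l.foldl (fun acc ia => acc + (if ia.2 = PySem.List.pyGetD p1 (PySem.Int.mod ia.1 (p1.length : Int)) 0 then 1 else 0)) s0,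
       l.foldl (fun acc ia => acc + (if ia.2 = PySem.List.pyGetD p2 (PySem.Int.mod ia.1 (p2.length : Int)) 0 then 1 else 0)) s1,
       l.foldl (fun acc ia => acc + (if ia.2 = PySem.List.pyGetD p3 (PySem.Int.mod ia.1 (p3.length : Int)) 0 then 1 else 0)) s2) := by
  induction l generalizing s0 s1 s2 with
  | nil => rfl
  | cons hd tl ih =>
      simp only [List.foldl_cons]
      split_ifs <;> simp [ih]

-- summing the 0/1 indicator "(r, f r) = (c, v)" over a Nodup list containing c picks it once
theorem pv_ind_sum (f : Int → Int) (c v : Int) :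
    ∀ (R : List Int), R.Nodup → c ∈ R →
      ((R.map (fun r => if (r, f r) = (c, v) then (1 : Int) else 0)).sum
        = if v = f c then 1 else 0) := by
  intro R
  induction R with
  | nil => intro _ h; cases h
  | cons r R ih =>
      intro hnd hm
      have hnd' := hnd.of_cons
      have hnotin : r ∉ R := (List.nodup_cons.mp hnd).1
      by_cases hrc : r = c
      · subst hrc
        have hz : ((R.map (fun x => if (x, f x) = (r, v) then (1 : Int) else 0)).sum) = 0 := by
          apply List.sum_eq_zero
          intro x hx
          rcases List.mem_map.mp hx with ⟨y, hy, rfl⟩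
          have : ¬ ((y, f y) = (r, v)) := by
            intro h; exact hnotin (by cases h; exact hy)
          simp [this]
        simp only [List.map_cons, List.sum_cons, hz, add_zero]
        by_cases hv : v = f r
        · simp [hv]
        · have : ¬ ((r, f r) = (r, v)) := by
            intro h; exact hv (by cases h; rfl)
          simp [this, hv]
      · have hm' : c ∈ R := by
          cases hm with
          | head => exact absurd rfl hrc
          | tail _ h => exact h
        have hhead : ¬ ((r, f r) = (c, v)) := by
          intro h; exact hrc (by cases h; rfl)
        simp only [List.map_cons, List.sum_cons, hhead, if_false, zero_add]
        exact ih hnd' hm'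

-- a (+ indicator) fold commutes with shifting its initial accumulator
theorem pv_foldl_shift (f : Int → Int) (l : List (Int × Int)) :
    ∀ (a b : Int),
      l.foldl (fun acc x => acc + (if x.2 = f x.1 then (1:Int) else 0)) (a + b)
      = l.foldl (fun acc x => acc + (if x.2 = f x.1 then (1:Int) else 0)) a + b := by
  induction l with
  | nil => intro a b; rfl
  | cons x l ihl =>
      intro a b
      simp only [List.foldl_cons]
      rw [show a + b + (if x.2 = f x.1 then (1:Int) else 0)
            = a + (if x.2 = f x.1 then (1:Int) else 0) + b by ring, ihl]

-- summing the counts of the keys (r, f r) over all residues r ∈ range(40) counts the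
-- matches k.2 = f k.1, provided every key's first component lies in [0, 40)
theorem pv_count_sum (f : Int → Int) :
    ∀ (ks : List (Int × Int)), (∀ k ∈ ks, 0 ≤ k.1 ∧ k.1 < 40) →
      ((PySem.List.pyRange 0 40 1).map
        (fun r => ((ks.count (r, f r) : Int)))).sum
      = ks.foldl (fun acc k => acc + (if k.2 = f k.1 then (1 : Int) else 0)) 0 := by
  intro ks
  induction ks with
  | nil => intro _; simp
  | cons k ks ih =>
      intro hb
      have hk := hb k (List.mem_cons_self)
      have hrest : ∀ x ∈ ks, 0 ≤ x.1 ∧ x.1 < 40 := fun x hx => hb x (List.mem_cons_of_mem _ hx)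
      have hcount : ∀ r : Int,
          (((k :: ks).count (r, f r) : Int))
            = ((ks.count (r, f r) : Int) + (if (r, f r) = k then (1:Int) else 0)) := by
        intro r
        rw [List.count_cons]
        push_cast
        by_cases h : (r, f r) = k
        · simp [h]
        · have h' : ¬ k = (r, f r) := fun hh => h hh.symm
          simp [h, h']
      have hsplit :
          ((PySem.List.pyRange 0 40 1).map (fun r => (((k :: ks).count (r, f r) : Int)))).sum
          = ((PySem.List.pyRange 0 40 1).map (fun r => ((ks.count (r, f r) : Int)))).sum
            + ((PySem.List.pyRange 0 40 1).map (fun r => if (r, f r) = k then (1:Int) else 0)).sum := by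
        rw [← PySem.List.sum_map_add_int]
        exact congrArg _ (List.map_congr_left (fun r _ => hcount r))
      have hmem : k.1 ∈ PySem.List.pyRange 0 40 1 :=
        (PySem.List.mem_pyRange_one).mpr ⟨hk.1, hk.2⟩
      have hindeq : ((PySem.List.pyRange 0 40 1).map (fun r => if (r, f r) = k then (1:Int) else 0)).sum
          = if k.2 = f k.1 then 1 else 0 := by
        simpa using pv_ind_sum f k.1 k.2 (PySem.List.pyRange 0 40 1)
          (PySem.List.nodup_pyRange_one 0 40) hmem
      rw [hsplit, hindeq, ih hrest, List.foldl_cons, zero_add,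
          show (if k.2 = f k.1 then (1:Int) else 0)
            = 0 + (if k.2 = f k.1 then (1:Int) else 0) by ring,
          pv_foldl_shift, zero_add]

-- B's per-pattern score (dict lookups over the 40 residues) equals A's per-pattern
-- match count, for any pattern whose length divides 40 and any index list with
-- nonnegative indices
theorem pv_score (p : List Int) (hdvd : ((p.length : Int)) ∣ 40)
    (hpos : 0 < (p.length : Int)) (l : List (Int × Int)) (hnn : ∀ ia ∈ l, 0 ≤ ia.1) :
    (PySem.List.pyRange 0 40 1).foldl
      (fun acc r =>
        acc + (l.foldl
          (fun (d : PySem.Dict (Int × Int) Int) ia =>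
            d.insert (PySem.Int.mod ia.1 40, ia.2) (d.getD (PySem.Int.mod ia.1 40, ia.2) 0 + 1))
          PySem.Dict.empty).getD
            (r, PySem.List.pyGetD p (PySem.Int.mod r (p.length : Int)) 0) 0)
      0
    = l.foldl
        (fun acc ia => acc + (if ia.2 = PySem.List.pyGetD p (PySem.Int.mod ia.1 (p.length : Int)) 0 then (1:Int) else 0)) 0 := by
  have hdict : ∀ v : Int × Int,
      (l.foldl
        (fun (d : PySem.Dict (Int × Int) Int) ia =>
          d.insert (PySem.Int.mod ia.1 40, ia.2) (d.getD (PySem.Int.mod ia.1 40, ia.2) 0 + 1))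
        PySem.Dict.empty).getD v 0
      = (((l.map (fun ia => (PySem.Int.mod ia.1 40, ia.2))).count v : Int)) := by
    intro v
    have h1 : (l.map (fun ia : Int × Int => (PySem.Int.mod ia.1 40, ia.2))).foldl
        (fun (d : PySem.Dict (Int × Int) Int) x => d.insert x (d.getD x 0 + 1))
        PySem.Dict.empty
        = l.foldl
          (fun (d : PySem.Dict (Int × Int) Int) ia =>
            d.insert (PySem.Int.mod ia.1 40, ia.2) (d.getD (PySem.Int.mod ia.1 40, ia.2) 0 + 1))
          PySem.Dict.empty := by
      rw [List.foldl_map]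
    rw [← h1, PySem.Dict.getD_foldl_insert_add_one]
    simp [PySem.Dict.getD_empty]
  rw [PySem.List.foldl_add, zero_add]
  rw [List.map_congr_left (fun r _ => hdict (r, PySem.List.pyGetD p (PySem.Int.mod r (p.length : Int)) 0))]
  rw [pv_count_sum (fun r => PySem.List.pyGetD p (PySem.Int.mod r (p.length : Int)) 0)
        (l.map (fun ia => (PySem.Int.mod ia.1 40, ia.2)))
        (by
          intro k hk
          rcases List.mem_map.mp hk with ⟨ia, hia, rfl⟩
          have h0 := hnn ia hia
          simp only
          rw [PySem.Int.mod_eq_emod_of_pos (by norm_num : (0:Int) < 40)]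
          exact ⟨Int.emod_nonneg _ (by norm_num), Int.emod_lt_of_pos _ (by norm_num)⟩)]
  rw [List.foldl_map]
  apply PySem.List.foldl_congr_mem
  intro acc ia hia
  have h0 := hnn ia hia
  have hmm : PySem.Int.mod (PySem.Int.mod ia.1 40) (p.length : Int)
      = PySem.Int.mod ia.1 (p.length : Int) := by
    rw [PySem.Int.mod_eq_emod_of_pos (by norm_num : (0:Int) < 40),
        PySem.Int.mod_eq_emod_of_pos hpos, PySem.Int.mod_eq_emod_of_pos hpos]
    exact Int.emod_emod_of_dvd _ hdvd
  simp only [hmm]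

-- indices produced by enumerate are nonnegative
theorem pv_enum_nonneg (answers : List Int) :
    ∀ ia ∈ PySem.List.enumerate answers, 0 ≤ ia.1 := by
  intro ia hia
  rcases (PySem.List.mem_enumerate_iff _ _ _).mp hia with ⟨j, hj, rfl⟩
  simp

-- ===== VERDICT (by name: the statement is the Claim_ definition above) =====
theorem solution_spec : Claim_equal_solution := by
  intro answers _
  unfold Spec_solution solution solution_alt
  simp only [List.map, pv_tri]
  have e1 :
      List.foldl (fun acc ia => acc + (if ia.2 = PySem.List.pyGetD [1, 2, 3, 4, 5] (PySem.Int.mod ia.1 ([1, 2, 3, 4, 5].length : Int)) 0 then (1:Int) else 0)) 0 (PySem.List.enumerate answers)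
      = List.foldl (fun (acc r : Int) => acc + (List.foldl (fun (d : PySem.Dict (Int × Int) Int) ia => d.insert (PySem.Int.mod ia.1 40, ia.2) (d.getD (PySem.Int.mod ia.1 40, ia.2) 0 + 1)) PySem.Dict.empty (PySem.List.enumerate answers)).getD (r, PySem.List.pyGetD [1, 2, 3, 4, 5] (PySem.Int.mod r ([1, 2, 3, 4, 5].length : Int)) 0) 0) 0 (PySem.List.pyRange 0 40 1) :=
    (pv_score [1, 2, 3, 4, 5] (by norm_num) (by norm_num) _ (pv_enum_nonneg answers)).symm
  have e2 :
      List.foldl (fun acc ia => acc + (if ia.2 = PySem.List.pyGetD [2, 1, 2, 3, 2, 4, 2, 5] (PySem.Int.mod ia.1 ([2, 1, 2, 3, 2, 4, 2, 5].length : Int)) 0 then (1:Int) else 0)) 0 (PySem.List.enumerate answers)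
      = List.foldl (fun (acc r : Int) => acc + (List.foldl (fun (d : PySem.Dict (Int × Int) Int) ia => d.insert (PySem.Int.mod ia.1 40, ia.2) (d.getD (PySem.Int.mod ia.1 40, ia.2) 0 + 1)) PySem.Dict.empty (PySem.List.enumerate answers)).getD (r, PySem.List.pyGetD [2, 1, 2, 3, 2, 4, 2, 5] (PySem.Int.mod r ([2, 1, 2, 3, 2, 4, 2, 5].length : Int)) 0) 0) 0 (PySem.List.pyRange 0 40 1) :=
    (pv_score [2, 1, 2, 3, 2, 4, 2, 5] (by norm_num) (by norm_num) _ (pv_enum_nonneg answers)).symm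
  have e3 :
      List.foldl (fun acc ia => acc + (if ia.2 = PySem.List.pyGetD [3, 3, 1, 1, 2, 2, 4, 4, 5, 5] (PySem.Int.mod ia.1 ([3, 3, 1, 1, 2, 2, 4, 4, 5, 5].length : Int)) 0 then (1:Int) else 0)) 0 (PySem.List.enumerate answers)
      = List.foldl (fun (acc r : Int) => acc + (List.foldl (fun (d : PySem.Dict (Int × Int) Int) ia => d.insert (PySem.Int.mod ia.1 40, ia.2) (d.getD (PySem.Int.mod ia.1 40, ia.2) 0 + 1)) PySem.Dict.empty (PySem.List.enumerate answers)).getD (r, PySem.List.pyGetD [3, 3, 1, 1, 2, 2, 4, 4, 5, 5] (PySem.Int.mod r ([3, 3, 1, 1, 2, 2, 4, 4, 5, 5].length : Int)) 0) 0) 0 (PySem.List.pyRange 0 40 1) :=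
    (pv_score [3, 3, 1, 1, 2, 2, 4, 4, 5, 5] (by norm_num) (by norm_num) _ (pv_enum_nonneg answers)).symm
  have hlist :
      ([List.foldl (fun acc ia => acc + (if ia.2 = PySem.List.pyGetD [1, 2, 3, 4, 5] (PySem.Int.mod ia.1 ([1, 2, 3, 4, 5].length : Int)) 0 then (1:Int) else 0)) 0 (PySem.List.enumerate answers),
        List.foldl (fun acc ia => acc + (if ia.2 = PySem.List.pyGetD [2, 1, 2, 3, 2, 4, 2, 5] (PySem.Int.mod ia.1 ([2, 1, 2, 3, 2, 4, 2, 5].length : Int)) 0 then (1:Int) else 0)) 0 (PySem.List.enumerate answers),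
        List.foldl (fun acc ia => acc + (if ia.2 = PySem.List.pyGetD [3, 3, 1, 1, 2, 2, 4, 4, 5, 5] (PySem.Int.mod ia.1 ([3, 3, 1, 1, 2, 2, 4, 4, 5, 5].length : Int)) 0 then (1:Int) else 0)) 0 (PySem.List.enumerate answers)] : List Int)
      = [List.foldl (fun (acc r : Int) => acc + (List.foldl (fun (d : PySem.Dict (Int × Int) Int) ia => d.insert (PySem.Int.mod ia.1 40, ia.2) (d.getD (PySem.Int.mod ia.1 40, ia.2) 0 + 1)) PySem.Dict.empty (PySem.List.enumerate answers)).getD (r, PySem.List.pyGetD [1, 2, 3, 4, 5] (PySem.Int.mod r ([1, 2, 3, 4, 5].length : Int)) 0) 0) 0 (PySem.List.pyRange 0 40 1),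
         List.foldl (fun (acc r : Int) => acc + (List.foldl (fun (d : PySem.Dict (Int × Int) Int) ia => d.insert (PySem.Int.mod ia.1 40, ia.2) (d.getD (PySem.Int.mod ia.1 40, ia.2) 0 + 1)) PySem.Dict.empty (PySem.List.enumerate answers)).getD (r, PySem.List.pyGetD [2, 1, 2, 3, 2, 4, 2, 5] (PySem.Int.mod r ([2, 1, 2, 3, 2, 4, 2, 5].length : Int)) 0) 0) 0 (PySem.List.pyRange 0 40 1),
         List.foldl (fun (acc r : Int) => acc + (List.foldl (fun (d : PySem.Dict (Int × Int) Int) ia => d.insert (PySem.Int.mod ia.1 40, ia.2) (d.getD (PySem.Int.mod ia.1 40, ia.2) 0 + 1)) PySem.Dict.empty (PySem.List.enumerate answers)).getD (r, PySem.List.pyGetD [3, 3, 1, 1, 2, 2, 4, 4, 5, 5] (PySem.Int.mod r ([3, 3, 1, 1, 2, 2, 4, 4, 5, 5].length : Int)) 0) 0) 0 (PySem.List.pyRange 0 40 1)] := by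
    rw [e1, e2, e3]
  exact congrArg (fun scores : List Int =>
    (PySem.List.enumerate scores).foldl
      (fun acc iv => if iv.2 = ((PySem.List.max? scores (fun x => x)).getD 0)
                     then acc ++ [iv.1 + 1] else acc) []) hlist
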